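-- pv_equiv track=rewrite | github.com/Charles-Ng/Super-accessible-bot | HTV/src/parser.py | csplit
-- ===== SOURCE A (Python) =====
-- def csplit(string):
--     delimiter = ", "
--     stack = [string]
--     for char in delimiter:
--         pieces = []
--         for substr in stack:
--             pieces.extend(substr.split(char))
--         stack = pieces
--
--     if(stack[0] == 'def'):
--         del stack[0];
--     return stack
-- ===== SOURCE B (Python) =====
-- def csplit(string):
--     res = []
--     cur = ''
--     for ch in string:
--         if ch == ',' or ch == ' ':
--             res.append(cur)
--             cur = ''
--         else:
--             cur += ch
--     res.append(cur)
--     if res[0] == 'def':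
--         del res[0]
--     return res
-- ===== Notes on version B (the rewrite author's own statement) =====
-- stated objective: alternative
-- what changed: Replaced the two full split passes (split by ',' then re-split every piece by ' ') with a single left-to-right character scan that flushes the current token at each delimiter, then the same single 'def' removal.
import Mathlib
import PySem

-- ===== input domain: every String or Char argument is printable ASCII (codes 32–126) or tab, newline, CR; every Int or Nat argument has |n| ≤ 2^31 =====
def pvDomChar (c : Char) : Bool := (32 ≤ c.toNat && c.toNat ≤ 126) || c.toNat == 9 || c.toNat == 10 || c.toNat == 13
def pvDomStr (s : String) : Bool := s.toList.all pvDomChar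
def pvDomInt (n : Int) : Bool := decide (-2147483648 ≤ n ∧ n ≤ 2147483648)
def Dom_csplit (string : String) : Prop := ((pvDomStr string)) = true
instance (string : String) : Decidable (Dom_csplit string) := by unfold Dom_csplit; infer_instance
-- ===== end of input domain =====

-- B replaces A's two successive split passes (by ',' then by ' ') with a single
-- left-to-right character scan flushing the current token at each delimiter (alternative decomposition).


-- ===== PORT A =====
-- strings are handled on the List Char side (PySem.Chars), exact per PYSEM.md
def csplit (string : String) : List String :=
  let stack : List (List Char) :=
    List.foldl
      (fun stack char =>
        stack.foldl (fun pieces substr => pieces ++ PySem.Chars.splitOn substr [char]) [])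
      [string.toList] [',', ' ']
  -- stack[0]: the stack is never empty (split always returns ≥ 1 piece), so pyGetD is exact here
  (if PySem.List.pyGetD stack 0 [] = "def".toList then stack.drop 1 else stack).map
    String.ofList

-- ===== PORT B =====
def csplit_alt (string : String) : List String :=
  let st :=
    string.toList.foldl
      (fun (st : List (List Char) × List Char) c =>
        if c = ',' ∨ c = ' ' then (st.1 ++ [st.2], []) else (st.1, st.2 ++ [c]))
      ([], [])
  let toks := st.1 ++ [st.2]
  (if PySem.List.pyGetD toks 0 [] = "def".toList then toks.drop 1 else toks).map
    String.ofList

-- ===== PRECONDITION & SPEC =====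
def Spec_csplit (string : String) (out : List String) : Prop := out = csplit_alt string
instance (string : String) (out : List String) : Decidable (Spec_csplit string out) := by unfold Spec_csplit; infer_instance

-- ===== CLAIM (what is proved, stated in full; the proofs are below) =====
def Claim_equal_csplit : Prop := ∀ (string : String), Dom_csplit string → Spec_csplit string (csplit string)

-- ===== LEMMAS AND PROOFS =====

-- simple recursive single-char split (proof-only characterisation of Python's s.split(c))
def split1 (c : Char) : List Char → List (List Char)
  | [] => [[]]
  | x :: xs =>
    if x = c then [] :: split1 c xs
    else
      match split1 c xs with
      | t :: ts => (x :: t) :: ts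
      | [] => [[x]]

-- prepend a prefix onto the first token
def consFirst (p : List Char) : List (List Char) → List (List Char)
  | t :: ts => (p ++ t) :: ts
  | [] => [p]

lemma split1_ne_nil (c : Char) (l : List Char) : split1 c l ≠ [] := by
  cases l with
  | nil => simp [split1]
  | cons x xs =>
    simp only [split1]
    split
    · simp
    · split <;> simp

lemma consFirst_nil (F : List (List Char)) (h : F ≠ []) : consFirst [] F = F := by
  cases F with
  | nil => exact absurd rfl h
  | cons t ts => simp [consFirst]

-- splitOn with a single-character separator is split1
lemma splitOn_go_single (c : Char) (l : List Char) :
    ∀ (fuel : Nat) (cur : List Char) (acc : List (List Char)), l.length ≤ fuel →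
      PySem.Chars.splitOn.go [c] fuel l cur acc =
        acc.reverse ++ consFirst cur.reverse (split1 c l) := by
  induction l with
  | nil =>
    intro fuel cur acc _
    cases fuel <;> simp [PySem.Chars.splitOn.go, split1, consFirst]
  | cons x xs ih =>
    intro fuel cur acc hf
    cases fuel with
    | zero => simp at hf
    | succ n =>
      by_cases hx : x = c
      · subst hx
        have hpre : List.isPrefixOf [x] (x :: xs) = true := by
          simp [List.isPrefixOf]
        rw [PySem.Chars.splitOn.go]
        simp only [hpre, if_true, List.length_cons, List.length_nil, Nat.zero_add,
          List.drop_succ_cons, List.drop_zero] at *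
        rw [ih n [] (cur.reverse :: acc) (by omega)]
        simp [split1]
        cases h : split1 x xs with
        | nil => exact absurd h (split1_ne_nil x xs)
        | cons t ts => simp [consFirst]
      · have hpre : List.isPrefixOf [c] (x :: xs) = false := by
          simp [List.isPrefixOf]
          exact fun h => absurd h.symm hx
        rw [PySem.Chars.splitOn.go]
        simp only [hpre, Bool.false_eq_true, if_false]
        rw [ih n (x :: cur) acc (by simpa using Nat.le_of_succ_le_succ hf)]
        simp only [split1, hx, if_false, List.reverse_cons]
        cases h : split1 c xs with
        | nil => exact absurd h (split1_ne_nil c xs)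
        | cons t ts => simp [consFirst]

lemma splitOn_single (c : Char) (l : List Char) :
    PySem.Chars.splitOn l [c] = split1 c l := by
  rw [PySem.Chars.splitOn, splitOn_go_single c l (l.length + 1) [] [] (by omega)]
  simp [consFirst_nil _ (split1_ne_nil c l)]

lemma flatMap_split1_ne_nil (xs : List (List Char)) (h : xs ≠ []) :
    xs.flatMap (fun s => split1 ' ' s) ≠ [] := by
  cases xs with
  | nil => exact absurd rfl h
  | cons t ts =>
    simp only [List.flatMap_cons, ne_eq, List.append_eq_nil_iff, not_and]
    intro hc
    exact absurd hc (split1_ne_nil ' ' t)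

-- B's scan as a recursive function
def scanTokens (cur : List Char) : List Char → List (List Char)
  | [] => [cur]
  | x :: xs => if x = ',' ∨ x = ' ' then cur :: scanTokens [] xs else scanTokens (cur ++ [x]) xs

lemma foldl_scan (l : List Char) :
    ∀ (res : List (List Char)) (cur : List Char),
      (let st := l.foldl
        (fun (st : List (List Char) × List Char) c =>
          if c = ',' ∨ c = ' ' then (st.1 ++ [st.2], []) else (st.1, st.2 ++ [c]))
        (res, cur)
       st.1 ++ [st.2]) = res ++ scanTokens cur l := by
  induction l with
  | nil => intro res cur; simp [scanTokens]
  | cons x xs ih =>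
    intro res cur
    by_cases hx : x = ',' ∨ x = ' '
    · simp only [List.foldl_cons, hx, if_true, scanTokens]
      rw [ih (res ++ [cur]) []]
      simp
    · simp only [List.foldl_cons, hx, if_false, scanTokens]
      exact ih res (cur ++ [x])

-- the key: the single scan equals the two split passes
lemma scan_eq_splits (l : List Char) :
    ∀ cur, scanTokens cur l =
      consFirst cur ((split1 ',' l).flatMap (fun s => split1 ' ' s)) := by
  induction l with
  | nil => intro cur; simp [scanTokens, split1, consFirst]
  | cons x xs ih =>
    intro cur
    by_cases hc : x = ','
    · subst hc
      simp only [scanTokens, split1, if_true, true_or, List.flatMap_cons]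
      rw [ih []]
      rw [consFirst_nil _ (flatMap_split1_ne_nil _ (split1_ne_nil ',' xs))]
      simp [consFirst]
    · by_cases hs : x = ' '
      · subst hs
        simp only [scanTokens, or_true, if_true, split1, hc, if_false]
        rw [ih []]
        rw [consFirst_nil _ (flatMap_split1_ne_nil _ (split1_ne_nil ',' xs))]
        cases h : split1 ',' xs with
        | nil => exact absurd h (split1_ne_nil ',' xs)
        | cons t ts =>
          simp [split1, consFirst]
      · have hx : ¬ (x = ',' ∨ x = ' ') := by tauto
        simp only [scanTokens, if_false, split1, hc]
        rw [ih (cur ++ [x])]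
        cases h : split1 ',' xs with
        | nil => exact absurd h (split1_ne_nil ',' xs)
        | cons t ts =>
          simp only [List.flatMap_cons]
          cases h2 : split1 ' ' t with
          | nil => exact absurd h2 (split1_ne_nil ' ' t)
          | cons u us =>
            simp [split1, hs, h2, consFirst]

-- the two ports build the same token list before the 'def' check
lemma toks_eq (s : List Char) :
    List.foldl
      (fun stack char =>
        stack.foldl (fun pieces substr => pieces ++ PySem.Chars.splitOn substr [char]) [])
      [s] [',', ' '] =
    (let st := s.foldl
        (fun (st : List (List Char) × List Char) c =>
          if c = ',' ∨ c = ' ' then (st.1 ++ [st.2], []) else (st.1, st.2 ++ [c]))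
        ([], [])
     st.1 ++ [st.2]) := by
  rw [foldl_scan s [] [], scan_eq_splits s []]
  rw [consFirst_nil _ (flatMap_split1_ne_nil _ (split1_ne_nil ',' s))]
  simp [splitOn_single, List.flatMap_def]

-- ===== VERDICT (by name: the statement is the Claim_ definition above) =====
theorem csplit_spec : Claim_equal_csplit := by
  intro s _
  unfold Spec_csplit csplit csplit_alt
  rw [toks_eq s.toList]
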